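-- pv_equiv track=rewrite | github.com/SjoerdTimovanVliet/SSVEP_interface_thesis | SNR_statistic_4d_plot_v1.py | create_combinations_of_groups
-- ===== SOURCE A (Python) =====
-- def create_combinations_of_groups(dictionary_of_categories_with_groups: dict) -> list:
--     """ Create all possible combinations of the groups
--
--     Args:
--         dictionary_of_categories_with_groups (dict): The dictionary of categories with groups
--
--     Returns:
--         list: All possible combinations of the groups
--     """
--     # unpack the categories keys from the dictionary
--     categories = list(
--         dictionary_of_categories_with_groups['categories'].keys())
--     # create all possible combinations of the groups between the categories
--     group_settings_of_categories = dictionary_of_categories_with_groups['categories']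
--     # category 1 is the main category and category 2 and 3 are the subcategories
--     # find all possbile combinations between the groups of the categories
--     combinations_of_groups = []
--     for group_1 in group_settings_of_categories[categories[0]]:
--         for group_2 in group_settings_of_categories[categories[1]]:
--             for group_3 in group_settings_of_categories[categories[2]]:
--                 combinations_of_groups.append([group_1, group_2, group_3])
--
--     return combinations_of_groups
-- ===== SOURCE B (Python) =====
-- def create_combinations_of_groups(dictionary_of_categories_with_groups: dict) -> list:
--     """Create all possible combinations of the groups (accumulating product)."""
--     group_settings = dictionary_of_categories_with_groups['categories']
--     categories = list(group_settings.keys())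
--     result = [[]]
--     for cat in (categories[0], categories[1], categories[2]):
--         result = [partial + [g] for partial in result for g in group_settings[cat]]
--     return result
-- ===== Notes on version B (the rewrite author's own statement) =====
-- stated objective: alternative
-- what changed: Replaces the three nested loops by an accumulating product: result starts as [[]] and one pass per category extends every partial combination by each group of that category.
import Mathlib
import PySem

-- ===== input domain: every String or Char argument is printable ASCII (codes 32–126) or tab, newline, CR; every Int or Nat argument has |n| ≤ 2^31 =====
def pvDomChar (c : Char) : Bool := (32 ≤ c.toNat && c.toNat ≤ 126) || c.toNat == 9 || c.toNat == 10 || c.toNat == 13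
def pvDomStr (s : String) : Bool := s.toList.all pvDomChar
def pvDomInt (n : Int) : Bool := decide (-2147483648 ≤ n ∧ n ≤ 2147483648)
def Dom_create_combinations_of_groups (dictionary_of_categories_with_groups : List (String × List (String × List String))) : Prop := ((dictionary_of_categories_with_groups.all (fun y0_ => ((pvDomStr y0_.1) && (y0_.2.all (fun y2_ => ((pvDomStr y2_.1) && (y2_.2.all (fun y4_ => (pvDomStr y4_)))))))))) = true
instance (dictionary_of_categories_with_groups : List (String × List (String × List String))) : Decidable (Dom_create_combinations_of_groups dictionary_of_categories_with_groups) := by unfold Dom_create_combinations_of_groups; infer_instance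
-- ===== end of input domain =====

-- B builds the product by accumulation (result = [[]], extended by one category per pass)
-- instead of A's three nested loops; same cost, different decomposition.


-- ===== PORT A =====
-- three nested loops appending [g1, g2, g3]
def create_combinations_of_groups (dictionary_of_categories_with_groups : List (String × List (String × List String))) : List (List String) :=
  match (PySem.Dict.ofList dictionary_of_categories_with_groups).get? "categories" with
  | none => []  -- KeyError in Python; excluded by Pre_
  | some cats =>
    let gs := PySem.Dict.ofList cats
    let categories := gs.keys
    match PySem.List.pyGet? categories 0, PySem.List.pyGet? categories 1, PySem.List.pyGet? categories 2 with
    | some c0, some c1, some c2 =>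
      (gs.getD c0 []).foldl (fun acc g1 =>
        (gs.getD c1 []).foldl (fun acc g2 =>
          (gs.getD c2 []).foldl (fun acc g3 => acc ++ [[g1, g2, g3]]) acc) acc) []
    | _, _, _ => []  -- IndexError in Python; excluded by Pre_

-- ===== PORT B =====
-- accumulating product: result = [[]], one comprehension pass per category
def create_combinations_of_groups_alt (dictionary_of_categories_with_groups : List (String × List (String × List String))) : List (List String) :=
  ((PySem.Dict.ofList dictionary_of_categories_with_groups).get? "categories").elim []  -- none = KeyError in Python; excluded by Pre_
    (fun cats =>
      let gs := PySem.Dict.ofList cats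
      let categories := gs.keys
      (PySem.List.pyGet? categories 0).elim [] (fun c0 =>    -- none = IndexError; excluded by Pre_
        (PySem.List.pyGet? categories 1).elim [] (fun c1 =>
          (PySem.List.pyGet? categories 2).elim [] (fun c2 =>
            [c0, c1, c2].foldl (fun result cat =>
              result.flatMap (fun partial_ => (gs.getD cat []).map (fun g => partial_ ++ [g]))) [[]]))))

-- ===== PRECONDITION & SPEC =====
-- Pre_ excludes exactly the inputs on which Python A raises: a missing 'categories' key
-- (KeyError) or fewer than three categories (IndexError on categories[2]).
def Pre_create_combinations_of_groups (dictionary_of_categories_with_groups : List (String × List (String × List String))) : Prop :=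
  (PySem.Dict.ofList dictionary_of_categories_with_groups).contains "categories" = true ∧
  3 ≤ (PySem.Dict.ofList ((PySem.Dict.ofList dictionary_of_categories_with_groups).getD "categories" [])).size
instance (dictionary_of_categories_with_groups : List (String × List (String × List String))) : Decidable (Pre_create_combinations_of_groups dictionary_of_categories_with_groups) := by unfold Pre_create_combinations_of_groups; infer_instance
def pvWitness_create_combinations_of_groups : (List (String × List (String × List String))) :=
  [("categories", [("a", ["x", "y"]), ("b", ["u"]), ("c", ["p", "q"])])]
def Spec_create_combinations_of_groups (dictionary_of_categories_with_groups : List (String × List (String × List String))) (out : List (List String)) : Prop := out = create_combinations_of_groups_alt dictionary_of_categories_with_groups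
instance (dictionary_of_categories_with_groups : List (String × List (String × List String))) (out : List (List String)) : Decidable (Spec_create_combinations_of_groups dictionary_of_categories_with_groups out) := by unfold Spec_create_combinations_of_groups; infer_instance

-- ===== CLAIM (what is proved, stated in full; the proofs are below) =====
def Claim_equal_create_combinations_of_groups : Prop := ∀ (dictionary_of_categories_with_groups : List (String × List (String × List String))), Dom_create_combinations_of_groups dictionary_of_categories_with_groups → Pre_create_combinations_of_groups dictionary_of_categories_with_groups → Spec_create_combinations_of_groups dictionary_of_categories_with_groups (create_combinations_of_groups dictionary_of_categories_with_groups)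

-- ===== LEMMAS AND PROOFS =====

-- both sides equal the same flatMap normal form, for any three group lists
theorem pv_prod_eq (l1 l2 l3 : List String) :
    l1.foldl (fun acc g1 =>
      l2.foldl (fun acc g2 =>
        l3.foldl (fun acc g3 => acc ++ [[g1, g2, g3]]) acc) acc) []
    = [l1, l2, l3].foldl (fun result l =>
        result.flatMap (fun p => l.map (fun g => p ++ [g]))) [[]] := by
  simp only [PySem.List.foldl_append_singleton_eq_map, PySem.List.foldl_append_eq_flatMap,
    List.foldl_cons, List.foldl_nil]
  simp only [List.flatMap_map, List.flatMap_assoc, List.nil_append]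
  simp [List.flatMap_def]

-- ===== VERDICT (by name: the statement is the Claim_ definition above) =====
theorem create_combinations_of_groups_spec : Claim_equal_create_combinations_of_groups := by
  intro d _ _
  unfold Spec_create_combinations_of_groups create_combinations_of_groups create_combinations_of_groups_alt
  cases (PySem.Dict.ofList d).get? "categories" with
  | none => rfl
  | some cats =>
    simp only [Option.elim_some]
    cases h0 : PySem.List.pyGet? (PySem.Dict.ofList cats).keys 0 <;>
      cases h1 : PySem.List.pyGet? (PySem.Dict.ofList cats).keys 1 <;>
        cases h2 : PySem.List.pyGet? (PySem.Dict.ofList cats).keys 2 <;>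
          (first | rfl | exact pv_prod_eq _ _ _)
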